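-- pv_equiv track=rewrite | github.com/Artamamo/lex | Three_Address.py | find_top_prio
-- ===== SOURCE A (Python) =====
-- prio_dict = {'-':1,'+':2,'*':3,'/':4,'^':5,'**':6}
--
-- def find_top_prio(lst):
--     top_prio = 1
--     count_ops = 0
--
--     for ops in lst:
--         if ops in prio_dict:
--             count_ops += 1
--             if prio_dict[ops] > 1:
--                 top_prio = prio_dict[ops]
--     return top_prio, count_ops
-- ===== SOURCE B (Python) =====
-- prio_dict = {'-':1,'+':2,'*':3,'/':4,'^':5,'**':6}
--
-- def find_top_prio(lst):
--     count_ops = 0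
--     for o in lst:
--         if o in prio_dict:
--             count_ops += 1
--     top_prio = 1
--     for o in reversed(lst):
--         p = prio_dict.get(o, 0)
--         if p > 1:
--             top_prio = p
--             break
--     return top_prio, count_ops
-- ===== Notes on version B (the rewrite author's own statement) =====
-- stated objective: alternative
-- what changed: B splits A's single accumulating loop into a counting pass plus a reversed scan that returns the priority of the first operator (from the right) with priority > 1 and stops early, matching A's last-wins top_prio without carrying loop state.
import Mathlib
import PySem

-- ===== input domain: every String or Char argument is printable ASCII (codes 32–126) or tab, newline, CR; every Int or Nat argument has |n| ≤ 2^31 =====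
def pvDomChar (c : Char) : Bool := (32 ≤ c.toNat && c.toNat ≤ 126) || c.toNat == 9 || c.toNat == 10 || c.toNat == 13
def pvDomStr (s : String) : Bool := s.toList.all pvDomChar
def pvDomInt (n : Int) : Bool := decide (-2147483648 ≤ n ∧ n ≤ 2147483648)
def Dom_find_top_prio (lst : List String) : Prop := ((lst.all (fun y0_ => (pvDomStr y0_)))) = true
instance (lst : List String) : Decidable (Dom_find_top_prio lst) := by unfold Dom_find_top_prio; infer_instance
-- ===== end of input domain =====

-- B replaces A's single stateful loop by a counting pass plus an early-exit reversed scan (alternative decomposition, same cost).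

-- module-level constant prio_dict
def prioDict : PySem.Dict String Int :=
  PySem.Dict.ofList [("-", 1), ("+", 2), ("*", 3), ("/", 4), ("^", 5), ("**", 6)]

-- ===== PORT A =====
def find_top_prio (lst : List String) : Int × Int :=
  lst.foldl (fun (st : Int × Int) ops =>
    if PySem.Dict.contains prioDict ops then
      let count_ops := st.2 + 1
      let p := PySem.Dict.getD prioDict ops 0   -- prio_dict[ops]; key present, default unused
      (if p > 1 then p else st.1, count_ops)
    else st) (1, 0)

-- ===== PORT B =====
-- first loop of B: count operators
def pvCountStep (acc : Int) (o : String) : Int :=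
  if PySem.Dict.contains prioDict o then acc + 1 else acc

-- second loop of B: scan reversed(lst), return first priority > 1, default 1
def pvTopLoop : List String → Int
  | [] => 1
  | o :: rest =>
    let p := PySem.Dict.getD prioDict o 0
    if p > 1 then p else pvTopLoop rest

def find_top_prio_alt (lst : List String) : Int × Int :=
  let count_ops := lst.foldl pvCountStep 0
  let top_prio := pvTopLoop lst.reverse
  (top_prio, count_ops)

-- ===== PRECONDITION & SPEC =====
def Spec_find_top_prio (lst : List String) (out : Int × Int) : Prop := out = find_top_prio_alt lst
instance (lst : List String) (out : Int × Int) : Decidable (Spec_find_top_prio lst out) := by unfold Spec_find_top_prio; infer_instance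

-- ===== CLAIM (what is proved, stated in full; the proofs are below) =====
def Claim_equal_find_top_prio : Prop := ∀ (lst : List String), Dom_find_top_prio lst → Spec_find_top_prio lst (find_top_prio lst)

-- ===== LEMMAS AND PROOFS =====

theorem pvTopLoop_one_or_gt (xs : List String) : pvTopLoop xs = 1 ∨ pvTopLoop xs > 1 := by
  induction xs with
  | nil => left; rfl
  | cons o rest ih =>
    simp only [pvTopLoop]
    split_ifs with h
    · right; exact h
    · exact ih

theorem pvTopLoop_append (xs : List String) (o : String) :
    pvTopLoop (xs ++ [o]) = if pvTopLoop xs > 1 then pvTopLoop xs else pvTopLoop [o] := by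
  induction xs with
  | nil => simp [pvTopLoop]
  | cons x rest ih =>
    simp only [List.cons_append, pvTopLoop]
    by_cases h : PySem.Dict.getD prioDict x 0 > 1
    · simp [h]
    · simp [h, ih, pvTopLoop]

theorem pvCount_shift (lst : List String) (c : Int) :
    lst.foldl pvCountStep c = c + lst.foldl pvCountStep 0 := by
  induction lst generalizing c with
  | nil => simp
  | cons o rest ih =>
    rw [List.foldl_cons, List.foldl_cons, ih, ih (pvCountStep 0 o)]
    simp only [pvCountStep]
    split_ifs <;> omega

theorem pvFold_main (lst : List String) (t c : Int) :
    lst.foldl (fun (st : Int × Int) ops =>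
      if PySem.Dict.contains prioDict ops then
        (if PySem.Dict.getD prioDict ops 0 > 1 then PySem.Dict.getD prioDict ops 0 else st.1, st.2 + 1)
      else st) (t, c)
    = ((if pvTopLoop lst.reverse > 1 then pvTopLoop lst.reverse else t),
       c + lst.foldl pvCountStep 0) := by
  induction lst generalizing t c with
  | nil => simp [pvTopLoop]
  | cons o rest ih =>
    simp only [List.foldl_cons, List.reverse_cons]
    rw [pvTopLoop_append, pvCount_shift rest (pvCountStep 0 o)]
    by_cases hc : PySem.Dict.contains prioDict o
    · simp only [hc, if_true, ih, pvCountStep, pvTopLoop, Prod.mk.injEq]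
      split_ifs <;> constructor <;> omega
    · have hg : PySem.Dict.getD prioDict o 0 = 0 :=
        PySem.Dict.getD_of_not_contains prioDict (0 : Int) (by simpa using hc)
      simp only [hc, ih, pvCountStep, pvTopLoop, hg, Prod.mk.injEq]
      split_ifs <;> constructor <;> omega

-- ===== VERDICT (by name: the statement is the Claim_ definition above) =====
theorem find_top_prio_spec : Claim_equal_find_top_prio := by
  intro lst _
  unfold Spec_find_top_prio find_top_prio find_top_prio_alt
  rw [pvFold_main]
  rcases pvTopLoop_one_or_gt lst.reverse with h | h <;> simp [h]
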